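-- pv_equiv track=rewrite | github.com/RDI-Foundation/agentbeats-tutorial | scenarios/security/defender_hardened_openai.py | _is_suspicious
-- ===== SOURCE A (Python) =====
-- def _is_suspicious(message: str) -> bool:
--     """Simple heuristic to detect suspicious requests"""
--     suspicious_patterns = [
--         "admin mode",
--         "ignore previous",
--         "ignore all",
--         "system prompt",
--         "your instructions",
--         "disregard",
--         "override",
--     ]
--     message_lower = message.lower()
--     return any(pattern in message_lower for pattern in suspicious_patterns)
-- ===== SOURCE B (Python) =====
-- _PATTERNS = ("admin mode", "ignore previous", "ignore all", "system prompt",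
--              "your instructions", "disregard", "override")
--
-- def _is_suspicious(message: str) -> bool:
--     """Single left-to-right scan: at each offset, does some pattern start there?"""
--     m = message.lower()
--     for i in range(len(m) + 1):
--         for p in _PATTERNS:
--             if m.startswith(p, i):
--                 return True
--     return False
-- ===== Notes on version B (the rewrite author's own statement) =====
-- stated objective: alternative
-- what changed: B replaces the seven independent substring-membership scans of the lowered message with a single left-to-right scan that checks at each offset whether any of the seven patterns starts there (startswith with an offset).
import Mathlib
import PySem

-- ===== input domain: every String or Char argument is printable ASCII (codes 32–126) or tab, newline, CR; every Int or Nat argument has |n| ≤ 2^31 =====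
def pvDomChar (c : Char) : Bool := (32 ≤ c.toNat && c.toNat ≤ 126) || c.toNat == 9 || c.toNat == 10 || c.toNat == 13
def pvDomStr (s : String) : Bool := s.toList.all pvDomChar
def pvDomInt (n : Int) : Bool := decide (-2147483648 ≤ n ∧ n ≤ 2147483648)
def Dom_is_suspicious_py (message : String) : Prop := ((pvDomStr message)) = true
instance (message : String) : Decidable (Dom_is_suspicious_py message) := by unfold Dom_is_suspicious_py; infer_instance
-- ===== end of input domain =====

-- B replaces seven independent substring membership tests with one left-to-right
-- scan of the lowered message, checking at each position whether any pattern starts there.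
-- ===== PORT A =====
def pvPatterns : List String :=
  ["admin mode", "ignore previous", "ignore all", "system prompt",
   "your instructions", "disregard", "override"]

def is_suspicious_py (message : String) : Bool :=
  let message_lower := PySem.Str.lower message
  pvPatterns.any (fun pattern => PySem.Str.isIn pattern message_lower)

-- ===== PORT B =====
def pvPatternsB : List (List Char) :=
  ["admin mode".toList, "ignore previous".toList, "ignore all".toList,
   "system prompt".toList, "your instructions".toList, "disregard".toList,
   "override".toList]

-- the scan over positions i = 0 .. len(m): at each position, does some pattern start here?
def pvScan (pats : List (List Char)) : List Char → Bool
  | [] => pats.any (fun p => p.isPrefixOf [])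
  | c :: t =>
    if pats.any (fun p => p.isPrefixOf (c :: t)) then true else pvScan pats t

def is_suspicious_py_alt (message : String) : Bool :=
  pvScan pvPatternsB (PySem.Chars.lower message.toList)

-- ===== PRECONDITION & SPEC =====
def Spec_is_suspicious_py (message : String) (out : Bool) : Prop := out = is_suspicious_py_alt message
instance (message : String) (out : Bool) : Decidable (Spec_is_suspicious_py message out) := by unfold Spec_is_suspicious_py; infer_instance

-- ===== CLAIM (what is proved, stated in full; the proofs are below) =====
def Claim_equal_is_suspicious_py : Prop := ∀ (message : String), Dom_is_suspicious_py message → Spec_is_suspicious_py message (is_suspicious_py message)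

-- ===== LEMMAS AND PROOFS =====
theorem pvScan_iff (pats : List (List Char)) (cs : List Char) :
    pvScan pats cs = true ↔ ∃ p ∈ pats, p <:+: cs := by
  induction cs with
  | nil =>
    simp [pvScan, List.any_eq_true, List.isPrefixOf_iff_prefix,
      List.prefix_nil, List.infix_nil]
  | cons c t ih =>
    rcases h : pats.any (fun p => p.isPrefixOf (c :: t)) with _ | _
    · rw [pvScan, h, if_neg (by simp), ih]
      constructor
      · rintro ⟨p, hp, hinf⟩; exact ⟨p, hp, List.infix_cons hinf⟩
      · rintro ⟨p, hp, hinf⟩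
        rcases (List.infix_cons_iff).mp hinf with hpre | hinf'
        · have : pats.any (fun p => p.isPrefixOf (c :: t)) = true :=
            List.any_eq_true.mpr ⟨p, hp, List.isPrefixOf_iff_prefix.mpr hpre⟩
          simp [h] at this
        · exact ⟨p, hp, hinf'⟩
    · rw [pvScan, h, if_pos rfl]
      rcases List.any_eq_true.mp h with ⟨p, hp, hpre⟩
      exact ⟨fun _ => ⟨p, hp, (List.isPrefixOf_iff_prefix.mp hpre).isInfix⟩, fun _ => rfl⟩

-- ===== VERDICT (by name: the statement is the Claim_ definition above) =====
theorem is_suspicious_py_spec : Claim_equal_is_suspicious_py := by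
  intro message _
  unfold Spec_is_suspicious_py is_suspicious_py is_suspicious_py_alt
  rw [Bool.eq_iff_iff, pvScan_iff]
  simp only [pvPatterns, pvPatternsB, List.any_cons, List.any_nil,
    Bool.or_eq_true, PySem.Str.isIn_iff_infix, PySem.Str.toList_lower,
    List.exists_mem_cons_iff, List.not_mem_nil]
  norm_num
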